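-- pv_equiv track=rewrite | github.com/MarcoP91/deep-learning | OCR-ML-Project/call_to_google_OCR/test_google_date.py | remove_extra_points
-- ===== SOURCE A (Python) =====
-- def remove_extra_points(string):
--     is_previous_point = False
--     new_string = ''
--     for i in range(len(string)):
--         if string[i] == '.':
--             if not is_previous_point:
--                 is_previous_point = True
--                 new_string += string[i]
--             else:
--                 pass
--         else:
--             is_previous_point = False
--             new_string += string[i]
--
--     return new_string
-- ===== SOURCE B (Python) =====
-- def remove_extra_points(string):
--     pieces = []
--     i = 0
--     n = len(string)
--     while i < n:
--         j = i
--         while j < n and string[j] == string[i]: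
--             j += 1
--         if string[i] == '.':
--             pieces.append('.')
--         else:
--             pieces.append(string[i:j])
--         i = j
--     return ''.join(pieces)
-- ===== Notes on version B (the rewrite author's own statement) =====
-- stated objective: alternative
-- what changed: Replaced the flag-based per-character scan with a run-based traversal: the string is split into maximal runs of identical characters, each dot-run is emitted as a single dot, other runs verbatim, pieces joined at the end.
import Mathlib
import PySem

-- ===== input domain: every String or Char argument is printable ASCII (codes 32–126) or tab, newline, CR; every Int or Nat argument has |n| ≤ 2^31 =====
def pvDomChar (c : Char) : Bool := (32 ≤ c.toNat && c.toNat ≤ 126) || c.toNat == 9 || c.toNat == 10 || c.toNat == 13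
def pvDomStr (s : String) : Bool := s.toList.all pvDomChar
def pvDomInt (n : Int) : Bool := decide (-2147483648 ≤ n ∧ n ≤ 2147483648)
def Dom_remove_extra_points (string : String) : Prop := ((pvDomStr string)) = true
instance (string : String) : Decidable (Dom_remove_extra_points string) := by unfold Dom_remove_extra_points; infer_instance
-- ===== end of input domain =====

-- B replaces A's flag-based per-character scan with a run-based traversal (maximal runs of
-- identical characters; a dot-run emits one dot, any other run is emitted verbatim): alternative decomposition.


-- ===== PORT A =====
-- flag-based scan: state = (is_previous_point, new_string), one step per character
def remove_extra_points (string : String) : String :=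
  String.mk (string.toList.foldl
    (fun (st : Bool × List Char) c =>
      if c = '.' then
        if st.1 = false then (true, st.2 ++ [c]) else st
      else (false, st.2 ++ [c]))
    (false, [])).2

-- ===== PORT B =====
-- run-based traversal: peel off the maximal run of the leading character, emit it (collapsed if '.')
def pvPieces (cs : List Char) : List Char :=
  match cs with
  | [] => []
  | c :: rest =>
    (if c = '.' then ['.'] else c :: rest.takeWhile (fun d => d = c)) ++
      pvPieces (rest.dropWhile (fun d => d = c))
termination_by cs.length
decreasing_by
  simp only [List.length_cons]
  exact Nat.lt_succ_of_le (List.length_dropWhile_le _ _)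

def remove_extra_points_alt (string : String) : String :=
  String.mk (pvPieces string.toList)

-- ===== PRECONDITION & SPEC =====
def Spec_remove_extra_points (string : String) (out : String) : Prop := out = remove_extra_points_alt string
instance (string : String) (out : String) : Decidable (Spec_remove_extra_points string out) := by unfold Spec_remove_extra_points; infer_instance

-- ===== CLAIM (what is proved, stated in full; the proofs are below) =====
def Claim_equal_remove_extra_points : Prop := ∀ (string : String), Dom_remove_extra_points string → Spec_remove_extra_points string (remove_extra_points string)

-- ===== LEMMAS AND PROOFS =====

-- reference recursion equal to A's scan
def pvGo (flag : Bool) (cs : List Char) : List Char :=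
  match cs with
  | [] => []
  | c :: rest =>
    if c = '.' then
      if flag then pvGo true rest else c :: pvGo true rest
    else c :: pvGo false rest

theorem pvFoldl_go (cs : List Char) (flag : Bool) (acc : List Char) :
    (cs.foldl
      (fun (st : Bool × List Char) c =>
        if c = '.' then
          if st.1 = false then (true, st.2 ++ [c]) else st
        else (false, st.2 ++ [c]))
      (flag, acc)).2 = acc ++ pvGo flag cs := by
  induction cs generalizing flag acc with
  | nil => simp [pvGo]
  | cons c rest ih =>
    simp only [List.foldl_cons, pvGo]
    by_cases hc : c = '.'
    · cases flag <;> simp [hc, ih]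
    · simp [hc, ih]

theorem pvGo_true_dropWhile (cs : List Char) :
    pvGo true cs = pvGo false (cs.dropWhile (fun d => d = '.')) := by
  induction cs with
  | nil => rfl
  | cons c rest ih =>
    by_cases hc : c = '.'
    · simp [pvGo, hc, ih, List.dropWhile]
    · simp [pvGo, hc, List.dropWhile]

theorem pvGo_false_run (c : Char) (hc : c ≠ '.') (cs : List Char) :
    pvGo false cs =
      cs.takeWhile (fun d => d = c) ++ pvGo false (cs.dropWhile (fun d => d = c)) := by
  induction cs with
  | nil => rfl
  | cons d rest ih =>
    by_cases hd : d = c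
    · subst hd
      simp [pvGo, hc, List.takeWhile, List.dropWhile, ih]
    · simp [List.takeWhile, List.dropWhile, hd]

theorem pvPieces_eq_go (cs : List Char) : pvPieces cs = pvGo false cs := by
  induction hn : cs.length using Nat.strong_induction_on generalizing cs with
  | _ n ih =>
    match cs with
    | [] => rw [pvPieces]; rfl
    | c :: rest =>
      rw [pvPieces]
      by_cases hc : c = '.'
      · subst hc
        have := ih (rest.dropWhile (fun d => d = '.')).length
          (by simp [← hn]; exact List.length_dropWhile_le _ _) _ rfl
        simp [pvGo, this, pvGo_true_dropWhile]
      · have := ih (rest.dropWhile (fun d => d = c)).length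
          (by simp [← hn]; exact List.length_dropWhile_le _ _) _ rfl
        simp only [hc, pvGo, this]
        simp [pvGo_false_run c hc rest]

-- ===== VERDICT (by name: the statement is the Claim_ definition above) =====
theorem remove_extra_points_spec : Claim_equal_remove_extra_points := by
  intro s _
  unfold Spec_remove_extra_points remove_extra_points remove_extra_points_alt
  rw [pvFoldl_go, pvPieces_eq_go]
  rfl
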